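-- pv_equiv track=rewrite | github.com/brigitarn/Exoraz-Dashboard | fetch_comments.py | classify_sentiment
-- ===== SOURCE A (Python) =====
-- def classify_sentiment(text, pos_words, neg_words):
--     words = text.split()
--     negations = ["tidak", "bukan", "nggak", "gak", "no", "kurang"]
--     sentiment = 0
--     for i, word in enumerate(words):
--         if word in pos_words:
--             sentiment = -1 if i > 0 and words[i - 1] in negations else 1
--         elif word in neg_words:
--             sentiment = 1 if i > 0 and words[i - 1] in negations else -1
--     return sentiment
-- ===== SOURCE B (Python) =====
-- def classify_sentiment(text, pos_words, neg_words):
--     words = text.split()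
--     negations = ["tidak", "bukan", "nggak", "gak", "no", "kurang"]
--     for i in range(len(words) - 1, -1, -1):
--         if words[i] in pos_words:
--             return -1 if i > 0 and words[i - 1] in negations else 1
--         if words[i] in neg_words:
--             return 1 if i > 0 and words[i - 1] in negations else -1
--     return 0
-- ===== Notes on version B (the rewrite author's own statement) =====
-- stated objective: alternative
-- what changed: Replaces A's forward overwrite-until-end accumulation with a backward scan that returns at the first (i.e. last-in-text) sentiment word, so the loop stops early instead of always traversing all words.
import Mathlib
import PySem

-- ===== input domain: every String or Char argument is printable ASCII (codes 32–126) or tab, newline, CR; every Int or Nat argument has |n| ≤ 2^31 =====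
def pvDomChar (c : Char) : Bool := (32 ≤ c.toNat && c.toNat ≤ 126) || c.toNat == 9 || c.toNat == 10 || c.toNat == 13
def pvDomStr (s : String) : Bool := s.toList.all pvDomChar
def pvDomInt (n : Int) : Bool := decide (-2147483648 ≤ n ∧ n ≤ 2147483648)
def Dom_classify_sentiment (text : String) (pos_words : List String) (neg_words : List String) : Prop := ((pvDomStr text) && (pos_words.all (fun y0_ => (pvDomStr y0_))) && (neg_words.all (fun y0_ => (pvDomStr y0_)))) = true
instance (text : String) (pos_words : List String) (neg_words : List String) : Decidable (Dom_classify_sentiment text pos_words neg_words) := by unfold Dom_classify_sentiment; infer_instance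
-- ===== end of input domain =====

-- B scans the words backwards and returns at the first (hence last-in-text) sentiment word,
-- instead of A's forward loop that overwrites an accumulator until the end; same return value.

-- ===== PORT A =====
def pvNegations : List String := ["tidak", "bukan", "nggak", "gak", "no", "kurang"]

-- forward loop over enumerate(words), overwriting the accumulator on each match
def classify_sentiment (text : String) (pos_words : List String) (neg_words : List String) : Int :=
  let words := PySem.Str.split₀ text
  (PySem.List.enumerate words 0).foldl
    (fun sentiment p =>
      if p.2 ∈ pos_words then
        (if p.1 > 0 ∧ PySem.List.pyGetD words (p.1 - 1) "" ∈ pvNegations then -1 else 1)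
      else if p.2 ∈ neg_words then
        (if p.1 > 0 ∧ PySem.List.pyGetD words (p.1 - 1) "" ∈ pvNegations then 1 else -1)
      else sentiment) 0

-- ===== PORT B =====
-- backward index loop 'for i in range(len(words)-1, -1, -1)' with early return; n = i+1
def csAltGo (pos_words neg_words words : List String) : Nat → Int
  | 0 => 0
  | n + 1 =>
    if PySem.List.pyGetD words (n : Int) "" ∈ pos_words then
      (if (n : Int) > 0 ∧ PySem.List.pyGetD words ((n : Int) - 1) "" ∈ pvNegations then -1 else 1)
    else if PySem.List.pyGetD words (n : Int) "" ∈ neg_words then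
      (if (n : Int) > 0 ∧ PySem.List.pyGetD words ((n : Int) - 1) "" ∈ pvNegations then 1 else -1)
    else csAltGo pos_words neg_words words n

def classify_sentiment_alt (text : String) (pos_words : List String) (neg_words : List String) : Int :=
  let words := PySem.Str.split₀ text
  csAltGo pos_words neg_words words words.length

-- ===== PRECONDITION & SPEC =====
def Spec_classify_sentiment (text : String) (pos_words : List String) (neg_words : List String) (out : Int) : Prop := out = classify_sentiment_alt text pos_words neg_words
instance (text : String) (pos_words : List String) (neg_words : List String) (out : Int) : Decidable (Spec_classify_sentiment text pos_words neg_words out) := by unfold Spec_classify_sentiment; infer_instance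

-- ===== CLAIM (what is proved, stated in full; the proofs are below) =====
def Claim_equal_classify_sentiment : Prop := ∀ (text : String) (pos_words : List String) (neg_words : List String), Dom_classify_sentiment text pos_words neg_words → Spec_classify_sentiment text pos_words neg_words (classify_sentiment text pos_words neg_words)

-- ===== LEMMAS AND PROOFS =====

-- A's fold over the first n words equals B's backward scan starting at index n-1
lemma cs_key (pos_words neg_words words : List String) (n : Nat) (hn : n ≤ words.length) :
    (PySem.List.enumerate (words.take n) 0).foldl
      (fun sentiment p =>
        if p.2 ∈ pos_words then
          (if p.1 > 0 ∧ PySem.List.pyGetD words (p.1 - 1) "" ∈ pvNegations then -1 else 1)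
        else if p.2 ∈ neg_words then
          (if p.1 > 0 ∧ PySem.List.pyGetD words (p.1 - 1) "" ∈ pvNegations then 1 else -1)
        else sentiment) 0
    = csAltGo pos_words neg_words words n := by
  induction n with
  | zero => simp [csAltGo]
  | succ n ih =>
    have hlt : n < words.length := hn
    have htake : words.take (n + 1) = words.take n ++ [words[n]] := by
      rw [List.take_add_one]
      simp [List.getElem?_eq_getElem hlt]
    have hlen : (words.take n).length = n := by simp [Nat.le_of_lt hlt]
    rw [htake, PySem.List.enumerate_append, List.foldl_append, ih (Nat.le_of_lt hlt), hlen]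
    have hget : PySem.List.pyGetD words ((n : Nat) : Int) "" = words[n] := by
      rw [PySem.List.pyGetD_natCast]
      simp [List.getD, List.getElem?_eq_getElem hlt]
    simp only [PySem.List.enumerate, List.foldl, csAltGo, hget]
    norm_num

-- ===== VERDICT (by name: the statement is the Claim_ definition above) =====
theorem classify_sentiment_spec : Claim_equal_classify_sentiment := by
  intro text pos_words neg_words _
  unfold Spec_classify_sentiment classify_sentiment classify_sentiment_alt
  have h := cs_key pos_words neg_words (PySem.Str.split₀ text)
    (PySem.Str.split₀ text).length le_rfl
  simpa using h
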